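-- pv_equiv track=rewrite | github.com/damo-cv/UFDN-Reid | data/datasets/__init__.py | concat_dataset
-- ===== SOURCE A (Python) =====
-- def concat_dataset(dataset_list):
--     vid_container, image_ids, cid_container, tid_container = list(), list(), list(), list()
--     vid_bias, cid_bias, tid_bias = 0, 0, 0
--     for i, dataset in enumerate(dataset_list):
--         if i > 0:
--             vid_bias += max(vid_container) + 1
--             cid_bias += max(cid_container) + 1
--             tid_bias += max(tid_container) + 1
--         vid_container += [vid_bias + data[1] for data in dataset]
--         image_ids += [data[0] for data in dataset]
--         cid_container += [cid_bias + data[2] for data in dataset]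
--         tid_container += [tid_bias + data[3] for data in dataset]
--     new_dataset = [(image_ids[i], vid_container[i], cid_container[i], tid_container[i]) for i in range(len(vid_container))]
--     return new_dataset, len(set(vid_container))
-- ===== SOURCE B (Python) =====
-- def concat_dataset(dataset_list):
--     new_dataset = []
--     vid_set = set()
--     vid_bias, cid_bias, tid_bias = 0, 0, 0
--     max_v = max_c = max_t = None
--     for dataset in dataset_list:
--         if max_v is not None:
--             vid_bias += max_v + 1
--             cid_bias += max_c + 1
--             tid_bias += max_t + 1
--         for img, vid, cid, tid in dataset:
--             v, c, t = vid_bias + vid, cid_bias + cid, tid_bias + tid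
--             new_dataset.append((img, v, c, t))
--             vid_set.add(v)
--             if max_v is None or v > max_v:
--                 max_v = v
--             if max_c is None or c > max_c:
--                 max_c = c
--             if max_t is None or t > max_t:
--                 max_t = t
--     return new_dataset, len(vid_set)
-- ===== Notes on version B (the rewrite author's own statement) =====
-- stated objective: faster
-- what changed: B does a single pass keeping running maxima of the already-biased ids and a set of seen vids, instead of re-scanning the growing containers with max() per dataset and rebuilding the output by index at the end.
import Mathlib
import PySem

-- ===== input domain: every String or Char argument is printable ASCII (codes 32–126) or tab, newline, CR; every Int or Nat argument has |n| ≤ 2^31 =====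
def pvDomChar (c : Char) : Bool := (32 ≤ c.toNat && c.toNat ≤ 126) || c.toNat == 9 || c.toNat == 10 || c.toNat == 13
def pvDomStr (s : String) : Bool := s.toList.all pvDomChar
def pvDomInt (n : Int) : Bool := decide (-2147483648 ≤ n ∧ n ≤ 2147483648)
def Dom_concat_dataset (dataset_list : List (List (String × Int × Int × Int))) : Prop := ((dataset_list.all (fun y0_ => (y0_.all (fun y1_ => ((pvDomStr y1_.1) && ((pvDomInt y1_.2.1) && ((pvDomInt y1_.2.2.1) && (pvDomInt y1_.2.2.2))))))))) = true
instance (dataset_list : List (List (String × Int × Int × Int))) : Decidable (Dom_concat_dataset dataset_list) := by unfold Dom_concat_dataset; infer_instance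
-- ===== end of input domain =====

-- B replaces A's per-iteration max() rescans of the growing containers (and the index-rebuild pass)
-- with one pass that keeps running maxima and a set of seen vids: objective = faster (asymptotic).

-- ===== PORT A =====
-- loop body of A's 'for i, dataset in enumerate(dataset_list)' (helper of the port)
def stepA (st : List Int × List String × List Int × List Int × Int × Int × Int)
    (p : Int × List (String × Int × Int × Int)) :
    List Int × List String × List Int × List Int × Int × Int × Int :=
  match st, p with
  | (vc, ids, cc, tc, vb, cb, tb), (i, dataset) =>
    -- 'max(container)' raises on an empty container: that case is excluded by Pre_ (getD 0 is never read there)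
    let vb := if 0 < i then vb + ((PySem.List.max? vc (fun x => x)).getD 0) + 1 else vb
    let cb := if 0 < i then cb + ((PySem.List.max? cc (fun x => x)).getD 0) + 1 else cb
    let tb := if 0 < i then tb + ((PySem.List.max? tc (fun x => x)).getD 0) + 1 else tb
    (vc ++ dataset.map (fun d => vb + d.2.1),
     ids ++ dataset.map (fun d => d.1),
     cc ++ dataset.map (fun d => cb + d.2.2.1),
     tc ++ dataset.map (fun d => tb + d.2.2.2),
     vb, cb, tb)

def concat_dataset (dataset_list : List (List (String × Int × Int × Int))) : (List (String × Int × Int × Int)) × Int :=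
  match (PySem.List.enumerate dataset_list).foldl stepA ([], [], [], [], 0, 0, 0) with
  | (vc, ids, cc, tc, _, _, _) =>
    ((PySem.List.pyRange 0 (vc.length : Int)).map (fun i =>
       (PySem.List.pyGetD ids i "", PySem.List.pyGetD vc i 0,
        PySem.List.pyGetD cc i 0, PySem.List.pyGetD tc i 0)),
     PySem.Set.len (PySem.Set.ofList vc))

-- ===== PORT B =====
-- 'if m is None or v > m: m = v' (helper of the port)
def updMax (m : Option Int) (v : Int) : Option Int :=
  match m with
  | none => some v
  | some m0 => if m0 < v then some v else some m0

-- body of B's inner 'for img, vid, cid, tid in dataset' (helper of the port)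
def stepBrow (st : List (String × Int × Int × Int) × PySem.Set Int × Int × Int × Int × Option Int × Option Int × Option Int)
    (d : String × Int × Int × Int) :
    List (String × Int × Int × Int) × PySem.Set Int × Int × Int × Int × Option Int × Option Int × Option Int :=
  match st with
  | (out, vset, vb, cb, tb, mv, mc, mt) =>
    let v := vb + d.2.1
    let c := cb + d.2.2.1
    let t := tb + d.2.2.2
    (out ++ [(d.1, v, c, t)], PySem.Set.add vset v, vb, cb, tb, updMax mv v, updMax mc c, updMax mt t)

-- body of B's outer 'for dataset in dataset_list' (helper of the port)
def stepB (st : List (String × Int × Int × Int) × PySem.Set Int × Int × Int × Int × Option Int × Option Int × Option Int)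
    (dataset : List (String × Int × Int × Int)) :
    List (String × Int × Int × Int) × PySem.Set Int × Int × Int × Int × Option Int × Option Int × Option Int :=
  match st with
  | (out, vset, vb, cb, tb, mv, mc, mt) =>
    let vb := match mv with | some m => vb + m + 1 | none => vb
    let cb := match mc with | some m => cb + m + 1 | none => cb
    let tb := match mt with | some m => tb + m + 1 | none => tb
    dataset.foldl stepBrow (out, vset, vb, cb, tb, mv, mc, mt)

def concat_dataset_alt (dataset_list : List (List (String × Int × Int × Int))) : (List (String × Int × Int × Int)) × Int :=
  match dataset_list.foldl stepB ([], [], 0, 0, 0, none, none, none) with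
  | (out, vset, _, _, _, _, _, _) => (out, PySem.Set.len vset)

-- ===== PRECONDITION & SPEC =====
-- Pre_ excludes exactly the inputs where A raises ValueError: at least two datasets with the first one empty
-- (then 'max(vid_container)' is taken of an empty list at i = 1).
def Pre_concat_dataset (dataset_list : List (List (String × Int × Int × Int))) : Prop :=
  dataset_list.length ≤ 1 ∨ dataset_list.headD [] ≠ []
instance (dataset_list : List (List (String × Int × Int × Int))) : Decidable (Pre_concat_dataset dataset_list) := by unfold Pre_concat_dataset; infer_instance

def pvWitness_concat_dataset : (List (List (String × Int × Int × Int))) := [[("a", 1, 2, 3)], [("b", 0, 0, 0)]]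

def Spec_concat_dataset (dataset_list : List (List (String × Int × Int × Int))) (out : (List (String × Int × Int × Int)) × Int) : Prop := out = concat_dataset_alt dataset_list
instance (dataset_list : List (List (String × Int × Int × Int))) (out : (List (String × Int × Int × Int)) × Int) : Decidable (Spec_concat_dataset dataset_list out) := by unfold Spec_concat_dataset; infer_instance

-- ===== CLAIM (what is proved, stated in full; the proofs are below) =====
def Claim_equal_concat_dataset : Prop := ∀ (dataset_list : List (List (String × Int × Int × Int))), Dom_concat_dataset dataset_list → Pre_concat_dataset dataset_list → Spec_concat_dataset dataset_list (concat_dataset dataset_list)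


-- ===== LEMMAS AND PROOFS =====

-- the row list B builds from four parallel columns
def combine (ids : List String) (vc cc tc : List Int) : List (String × Int × Int × Int) :=
  List.zipWith (fun s p => (s, p)) ids (List.zipWith (fun v p => (v, p)) vc (List.zipWith Prod.mk cc tc))

-- B's state as a function of A's state
def mirror (st : List Int × List String × List Int × List Int × Int × Int × Int) :
    List (String × Int × Int × Int) × PySem.Set Int × Int × Int × Int × Option Int × Option Int × Option Int :=
  match st with
  | (vc, ids, cc, tc, vb, cb, tb) =>
    (combine ids vc cc tc, PySem.Set.ofList vc, vb, cb, tb,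
     PySem.List.max? vc (fun x => x), PySem.List.max? cc (fun x => x), PySem.List.max? tc (fun x => x))

def goodA (st : List Int × List String × List Int × List Int × Int × Int × Int) : Prop :=
  st.2.1.length = st.1.length ∧ st.2.2.1.length = st.1.length ∧ st.2.2.2.1.length = st.1.length

lemma foldl_stepBrow (d : List (String × Int × Int × Int)) :
    ∀ out vset (vb cb tb : Int) mv mc mt,
    d.foldl stepBrow (out, vset, vb, cb, tb, mv, mc, mt) =
      (out ++ combine (d.map (·.1)) (d.map (fun r => vb + r.2.1)) (d.map (fun r => cb + r.2.2.1)) (d.map (fun r => tb + r.2.2.2)),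
       (d.map (fun r => vb + r.2.1)).foldl PySem.Set.add vset,
       vb, cb, tb,
       (d.map (fun r => vb + r.2.1)).foldl updMax mv,
       (d.map (fun r => cb + r.2.2.1)).foldl updMax mc,
       (d.map (fun r => tb + r.2.2.2)).foldl updMax mt) := by
  induction d with
  | nil => intro out vset vb cb tb mv mc mt; simp [combine]
  | cons r rs ih =>
    intro out vset vb cb tb mv mc mt
    simp only [List.foldl_cons, stepBrow, List.map_cons, combine, List.zipWith_cons_cons]
    rw [ih]
    simp [combine]

lemma updMax_single (xs : List Int) (y : Int) :
    updMax (PySem.List.max? xs (fun x => x)) y = PySem.List.max? (xs ++ [y]) (fun x => x) := by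
  cases xs with
  | nil => simp [updMax, PySem.List.max?]
  | cons a t =>
    rw [PySem.List.max?_id_cons, List.cons_append, PySem.List.max?_id_cons, List.foldl_append]
    simp only [updMax, List.foldl_cons, List.foldl_nil]
    rcases lt_or_ge (List.foldl max a t) y with h | h
    · simp [h, max_eq_right h.le]
    · simp [not_lt.mpr h, max_eq_left h]

lemma updMax_max? (ys : List Int) : ∀ xs : List Int,
    ys.foldl updMax (PySem.List.max? xs (fun x => x)) = PySem.List.max? (xs ++ ys) (fun x => x) := by
  induction ys with
  | nil => intro xs; simp
  | cons y t ih =>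
    intro xs
    rw [List.foldl_cons, updMax_single, ih, List.append_assoc]
    rfl

lemma ofList_append (xs ys : List Int) :
    ys.foldl PySem.Set.add (PySem.Set.ofList xs) = PySem.Set.ofList (xs ++ ys) := by
  simp [PySem.Set.ofList_eq_foldl, List.foldl_append]


lemma combine_app (ids : List String) (vc cc tc : List Int)
    (ids' : List String) (vc' cc' tc' : List Int)
    (h1 : ids.length = vc.length) (h2 : cc.length = vc.length) (h3 : tc.length = vc.length) :
    combine (ids ++ ids') (vc ++ vc') (cc ++ cc') (tc ++ tc') =
      combine ids vc cc tc ++ combine ids' vc' cc' tc' := by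
  unfold combine
  have e1 : List.zipWith Prod.mk (cc ++ cc') (tc ++ tc')
      = List.zipWith Prod.mk cc tc ++ List.zipWith Prod.mk cc' tc' :=
    List.zipWith_append (by omega)
  rw [e1]
  have e2 : List.zipWith (fun v p => (v, p)) (vc ++ vc')
        (List.zipWith Prod.mk cc tc ++ List.zipWith Prod.mk cc' tc')
      = List.zipWith (fun v p => (v, p)) vc (List.zipWith Prod.mk cc tc)
        ++ List.zipWith (fun v p => (v, p)) vc' (List.zipWith Prod.mk cc' tc') :=
    List.zipWith_append (by simp [List.length_zipWith]; omega)
  rw [e2]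
  exact List.zipWith_append (by simp [List.length_zipWith]; omega)

lemma step_mirror (st : List Int × List String × List Int × List Int × Int × Int × Int)
    (i : Int) (d : List (String × Int × Int × Int))
    (hg : goodA st) (hi : 0 < i ↔ st.1 ≠ []) :
    stepB (mirror st) d = mirror (stepA st (i, d)) ∧ goodA (stepA st (i, d)) ∧
      (stepA st (i, d)).1 = st.1 ++ d.map (fun r =>
        (if 0 < i then st.2.2.2.2.1 + ((PySem.List.max? st.1 (fun x => x)).getD 0) + 1 else st.2.2.2.2.1) + r.2.1) := by
  obtain ⟨vc, ids, cc, tc, vb, cb, tb⟩ := st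
  obtain ⟨h1, h2, h3⟩ := hg
  simp only at h1 h2 h3 hi
  by_cases hvc : vc = []
  · subst hvc
    have hids : ids = [] := List.eq_nil_of_length_eq_zero h1
    have hcc : cc = [] := List.eq_nil_of_length_eq_zero h2
    have htc : tc = [] := List.eq_nil_of_length_eq_zero h3
    subst hids; subst hcc; subst htc
    have hi0 : ¬ 0 < i := by simp at hi; omega
    have hmB : stepB (mirror ([], [], [], [], vb, cb, tb)) d
        = d.foldl stepBrow ([], [], vb, cb, tb, none, none, none) := rfl
    have hmA : stepA ([], [], [], [], vb, cb, tb) (i, d)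
        = (d.map (fun r => vb + r.2.1), d.map (fun r => r.1),
           d.map (fun r => cb + r.2.2.1), d.map (fun r => tb + r.2.2.2), vb, cb, tb) := by
      simp [stepA, if_neg hi0]
    have h0 : ∀ ys : List Int, ys.foldl updMax none = PySem.List.max? ys (fun x => x) :=
      fun ys => by simpa using updMax_max? ys []
    refine ⟨?_, by simp [goodA, hmA], by simp [hmA, hi0]⟩
    rw [hmB, foldl_stepBrow, hmA]
    simp only [mirror]
    simp [h0, PySem.Set.ofList_eq_foldl]
  · have hipos : 0 < i := hi.mpr hvc
    have hcc : cc ≠ [] := by intro h; subst h; simp at h2; exact hvc (List.eq_nil_of_length_eq_zero h2.symm)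
    have htc : tc ≠ [] := by intro h; subst h; simp at h3; exact hvc (List.eq_nil_of_length_eq_zero h3.symm)
    obtain ⟨mv, hmv⟩ : ∃ m, PySem.List.max? vc (fun x => x) = some m := by
      cases h : PySem.List.max? vc (fun x => x) with
      | none => exact absurd ((PySem.List.max?_eq_none_iff _ _).mp h) hvc
      | some m => exact ⟨m, rfl⟩
    obtain ⟨mc, hmc⟩ : ∃ m, PySem.List.max? cc (fun x => x) = some m := by
      cases h : PySem.List.max? cc (fun x => x) with
      | none => exact absurd ((PySem.List.max?_eq_none_iff _ _).mp h) hcc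
      | some m => exact ⟨m, rfl⟩
    obtain ⟨mt, hmt⟩ : ∃ m, PySem.List.max? tc (fun x => x) = some m := by
      cases h : PySem.List.max? tc (fun x => x) with
      | none => exact absurd ((PySem.List.max?_eq_none_iff _ _).mp h) htc
      | some m => exact ⟨m, rfl⟩
    have hmB : stepB (mirror (vc, ids, cc, tc, vb, cb, tb)) d
        = d.foldl stepBrow (combine ids vc cc tc, PySem.Set.ofList vc,
            vb + mv + 1, cb + mc + 1, tb + mt + 1, some mv, some mc, some mt) := by
      simp [stepB, mirror, hmv, hmc, hmt]
    have hmA : stepA (vc, ids, cc, tc, vb, cb, tb) (i, d)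
        = (vc ++ d.map (fun r => (vb + mv + 1) + r.2.1), ids ++ d.map (fun r => r.1),
           cc ++ d.map (fun r => (cb + mc + 1) + r.2.2.1),
           tc ++ d.map (fun r => (tb + mt + 1) + r.2.2.2),
           vb + mv + 1, cb + mc + 1, tb + mt + 1) := by
      simp [stepA, if_pos hipos, hmv, hmc, hmt]
    refine ⟨?_, by simp [goodA, hmA, h1, h2, h3], by simp [hmA, hipos, hmv]⟩
    rw [hmB, foldl_stepBrow, hmA]
    simp only [mirror]
    rw [← hmv, ← hmc, ← hmt, updMax_max?, updMax_max?, updMax_max?, ofList_append,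
      combine_app ids vc cc tc _ _ _ _ h1 h2 h3]

lemma loop (rest : List (List (String × Int × Int × Int))) :
    ∀ (k : Int), 1 ≤ k → ∀ st, goodA st → st.1 ≠ [] →
    rest.foldl stepB (mirror st) = mirror ((PySem.List.enumerate rest k).foldl stepA st) ∧
      goodA ((PySem.List.enumerate rest k).foldl stepA st) := by
  induction rest with
  | nil =>
    intro k hk st hg hne
    exact ⟨by simp [PySem.List.enumerate_nil], by simpa [PySem.List.enumerate_nil] using hg⟩
  | cons d rs ih =>
    intro k hk st hg hne
    rw [PySem.List.enumerate_cons]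
    simp only [List.foldl_cons]
    obtain ⟨hB, hgood, hvc⟩ := step_mirror st k d hg (by constructor <;> intro _ <;> [exact hne; omega])
    rw [hB]
    refine ih (k + 1) (by omega) _ hgood ?_
    rw [hvc]
    intro hcontra
    exact hne (List.append_eq_nil_iff.mp hcontra).1

lemma final_eq (ids : List String) (vc cc tc : List Int)
    (h1 : ids.length = vc.length) (h2 : cc.length = vc.length) (h3 : tc.length = vc.length) :
    (PySem.List.pyRange 0 (vc.length : Int)).map (fun i =>
       (PySem.List.pyGetD ids i "", PySem.List.pyGetD vc i 0,
        PySem.List.pyGetD cc i 0, PySem.List.pyGetD tc i 0)) = combine ids vc cc tc := by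
  rw [PySem.List.pyRange_zero_nat, List.map_map]
  apply List.ext_getElem
  · simp [combine, List.length_zipWith, h1, h2, h3]
  · intro n hn hn'
    simp only [List.length_map, List.length_range] at hn
    simp only [List.getElem_map, List.getElem_range, Function.comp_apply,
      PySem.List.pyGetD_natCast, combine, List.getElem_zipWith]
    rw [List.getD_eq_getElem ids _ (by omega), List.getD_eq_getElem vc _ (by omega),
      List.getD_eq_getElem cc _ (by omega), List.getD_eq_getElem tc _ (by omega)]

-- ===== VERDICT (by name: the statement is the Claim_ definition above) =====
theorem concat_dataset_spec : Claim_equal_concat_dataset := by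
  intro dsl _hdom hpre
  unfold Spec_concat_dataset
  cases dsl with
  | nil => rfl
  | cons d0 rest =>
    unfold concat_dataset concat_dataset_alt
    rw [PySem.List.enumerate_cons]
    simp only [List.foldl_cons]
    have init_mirror : ((([] : List (String × Int × Int × Int)), ([] : PySem.Set Int), (0:Int), (0:Int), (0:Int), (none : Option Int), (none : Option Int), (none : Option Int))) = mirror ([], [], [], [], 0, 0, 0) := rfl
    rw [init_mirror]
    obtain ⟨hB1, hg1, hvc1⟩ := step_mirror ([], [], [], [], 0, 0, 0) 0 d0 (by simp [goodA]) (by simp)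
    rw [hB1]
    cases rest with
    | nil =>
      simp only [PySem.List.enumerate_nil, List.foldl_nil]
      generalize hA : stepA ([], [], [], [], 0, 0, 0) (0, d0) = stA at hg1 ⊢
      obtain ⟨vc, ids, cc, tc, vb, cb, tb⟩ := stA
      obtain ⟨g1, g2, g3⟩ := hg1
      simp only [mirror]
      rw [final_eq ids vc cc tc g1 g2 g3]
    | cons r rs =>
      simp only [zero_add]
      have hd0 : d0 ≠ [] := by
        rcases hpre with h | h
        · simp at h
        · simpa using h
      have hne1 : (stepA ([], [], [], [], 0, 0, 0) (0, d0)).1 ≠ [] := by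
        rw [hvc1]; simpa using hd0
      obtain ⟨hloop, hgend⟩ := loop (r :: rs) 1 (by omega) _ hg1 hne1
      rw [hloop]
      generalize hA : (PySem.List.enumerate (r :: rs) 1).foldl stepA (stepA ([], [], [], [], 0, 0, 0) (0, d0)) = stA at hgend ⊢
      obtain ⟨vc, ids, cc, tc, vb, cb, tb⟩ := stA
      obtain ⟨g1, g2, g3⟩ := hgend
      simp only [mirror]
      rw [final_eq ids vc cc tc g1 g2 g3]
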